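-- pv_equiv track=rewrite | github.com/eniallator/Compression-Format | compression/compress/serialise.py | pos_int_to_dynamic_bits
-- ===== SOURCE A (Python) =====
-- def pos_int_to_dynamic_bits(n: int, chunk_size: int) -> str:
--     bits = bin(n)[2:]
--     padded = "0" * (chunk_size - len(bits) % chunk_size) + bits
--     return (
--         "1".join(
--             padded[i * chunk_size : (i + 1) * chunk_size]
--             for i in range(len(padded) // chunk_size)
--         )
--         + "0"
--     )
-- ===== SOURCE B (Python) =====
-- def pos_int_to_dynamic_bits(n: int, chunk_size: int) -> str:
--     bit_count = n.bit_length() or 1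
--     num_chunks = bit_count // chunk_size + 1
--     return "1".join(
--         format(
--             (n >> ((num_chunks - 1 - i) * chunk_size)) & ((1 << chunk_size) - 1),
--             f"0{chunk_size}b",
--         )
--         for i in range(num_chunks)
--     ) + "0"
-- ===== Notes on version B (the rewrite author's own statement) =====
-- stated objective: alternative
-- what changed: B never builds or pads the full bit string: it computes the chunk count arithmetically from n.bit_length() and extracts each chunk directly from the integer by shift-and-mask, formatting each chunk to fixed width, instead of A's bin()/string-padding/slicing pipeline.
-- outside the precondition, e.g. on pos_int_to_dynamic_bits(-5, 3): A returns '00b11010', B returns '11110110'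
import Mathlib
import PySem

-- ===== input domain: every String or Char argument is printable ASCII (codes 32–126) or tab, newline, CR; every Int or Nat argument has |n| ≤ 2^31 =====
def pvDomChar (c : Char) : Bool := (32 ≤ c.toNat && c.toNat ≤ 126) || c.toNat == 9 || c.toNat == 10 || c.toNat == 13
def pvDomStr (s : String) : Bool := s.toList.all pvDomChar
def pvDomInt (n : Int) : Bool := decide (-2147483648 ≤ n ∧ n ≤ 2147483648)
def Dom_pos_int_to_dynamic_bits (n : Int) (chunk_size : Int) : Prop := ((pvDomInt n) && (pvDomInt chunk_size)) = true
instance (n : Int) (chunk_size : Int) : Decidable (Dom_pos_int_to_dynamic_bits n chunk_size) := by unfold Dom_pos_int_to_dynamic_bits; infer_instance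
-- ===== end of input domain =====

-- B replaces A's bin()/string-padding/slicing pipeline by computing the chunk count from n.bit_length()
-- and extracting each chunk from the integer by shift-and-mask (objective: alternative algorithm, same cost).


-- ===== PORT A =====
def pos_int_to_dynamic_bits (n : Int) (chunk_size : Int) : String :=
  -- bits = bin(n)[2:]
  let bits : List Char := PySem.List.slice (PySem.Int.toBinChars0b n) (some 2) none
  -- padded = "0" * (chunk_size - len(bits) % chunk_size) + bits
  let padded : List Char :=
    List.replicate (chunk_size - PySem.Int.mod (bits.length : Int) chunk_size).toNat '0' ++ bits
  -- "1".join(padded[i*chunk_size : (i+1)*chunk_size] for i in range(len(padded)//chunk_size)) + "0"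
  String.ofList
    (PySem.Chars.join ['1']
      ((PySem.List.pyRange 0 (PySem.Int.floordiv (padded.length : Int) chunk_size) 1).map
        (fun i => PySem.List.slice padded (some (i * chunk_size)) (some ((i + 1) * chunk_size))))
      ++ ['0'])

-- ===== PORT B =====
def pos_int_to_dynamic_bits_alt (n : Int) (chunk_size : Int) : String :=
  -- bit_count = n.bit_length() or 1
  let bit_count : Int := if PySem.Int.bitLength n = 0 then 1 else (PySem.Int.bitLength n : Int)
  -- num_chunks = bit_count // chunk_size + 1
  let num_chunks : Int := PySem.Int.floordiv bit_count chunk_size + 1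
  -- "1".join(format((n >> ((num_chunks-1-i)*chunk_size)) & ((1 << chunk_size) - 1), f"0{chunk_size}b") for i in range(num_chunks)) + "0"
  String.ofList
    (PySem.Chars.join ['1']
      ((PySem.List.pyRange 0 num_chunks 1).map (fun i =>
        let v : Int := PySem.Int.band (n >>> ((num_chunks - 1 - i) * chunk_size).toNat)
                         ((1 <<< chunk_size.toNat) - 1)
        let s : List Char := PySem.Int.toBinChars v
        List.replicate (chunk_size - (s.length : Int)).toNat '0' ++ s))
      ++ ['0'])

-- ===== PRECONDITION & SPEC =====
-- Pre_ excludes chunk_size = 0, where A raises ZeroDivisionError (and B does too), and negative n,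
-- outside this positive-int encoder's domain, where bin(n)[2:] accidentally keeps the 'b' of the
-- '-0b' prefix in A's output — an artefact of slicing that B does not reproduce.
def Pre_pos_int_to_dynamic_bits (n : Int) (chunk_size : Int) : Prop := 0 ≤ n ∧ chunk_size ≠ 0
instance (n : Int) (chunk_size : Int) : Decidable (Pre_pos_int_to_dynamic_bits n chunk_size) := by
  unfold Pre_pos_int_to_dynamic_bits; infer_instance

def pvWitness_pos_int_to_dynamic_bits : Int × Int := (5, 3)

def Spec_pos_int_to_dynamic_bits (n : Int) (chunk_size : Int) (out : String) : Prop := out = pos_int_to_dynamic_bits_alt n chunk_size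
instance (n : Int) (chunk_size : Int) (out : String) : Decidable (Spec_pos_int_to_dynamic_bits n chunk_size out) := by unfold Spec_pos_int_to_dynamic_bits; infer_instance

-- ===== CLAIM (what is proved, stated in full; the proofs are below) =====
def Claim_equal_pos_int_to_dynamic_bits : Prop := ∀ (n : Int) (chunk_size : Int), Dom_pos_int_to_dynamic_bits n chunk_size → Pre_pos_int_to_dynamic_bits n chunk_size → Spec_pos_int_to_dynamic_bits n chunk_size (pos_int_to_dynamic_bits n chunk_size)

-- ===== LEMMAS AND PROOFS =====

def binN (m : Nat) : List Char :=
  if _h : m < 2 then [Nat.digitChar m] else binN (m / 2) ++ [Nat.digitChar (m % 2)]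
decreasing_by exact Nat.div_lt_self (by omega) (by omega)

theorem binN_lt2 (m : Nat) (h : m < 2) : binN m = [Nat.digitChar m] := by
  rw [binN]; simp [h]
theorem binN_ge2 (m : Nat) (h : 2 ≤ m) : binN m = binN (m / 2) ++ [Nat.digitChar (m % 2)] := by
  rw [binN]; simp [show ¬ m < 2 by omega]

theorem toDigitsCore_eq (fuel : Nat) : ∀ (m : Nat) (acc : List Char), m < fuel →
    Nat.toDigitsCore 2 fuel m acc = binN m ++ acc := by
  induction fuel with
  | zero => intro m acc h; omega
  | succ fuel ih =>
    intro m acc h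
    rw [Nat.toDigitsCore]
    by_cases h2 : m / 2 = 0
    · simp only [h2, if_pos]
      have hm : m < 2 := by omega
      rw [binN_lt2 m hm, Nat.mod_eq_of_lt hm]
      simp
    · rw [if_neg h2]
      rw [ih (m / 2) _ (by omega), binN_ge2 m (by omega)]
      simp
theorem toDigits_eq (m : Nat) : Nat.toDigits 2 m = binN m := by
  rw [Nat.toDigits, toDigitsCore_eq m.succ m [] (by omega), List.append_nil]
theorem binN_len (m : Nat) : (binN m).length = max 1 (PySem.Int.bitLength (m : Int)) := by
  induction m using Nat.strong_induction_on with
  | _ m ih =>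
    by_cases h : m < 2
    · interval_cases m <;> rw [binN_lt2 _ (by omega)] <;> decide
    · rw [binN_ge2 m (by omega), PySem.Int.bitLength_natCast (by omega)]
      simp only [List.length_append, List.length_singleton]
      rw [ih (m/2) (by omega)]
      have : 0 < m / 2 := by omega
      have hb := PySem.Int.bitLength_natCast (m := m/2) this
      omega

def padW (w x : Nat) : List Char := List.replicate (w - (binN x).length) '0' ++ binN x

theorem binN_len_pos (x : Nat) : 1 ≤ (binN x).length := by
  rw [binN_len]; omega

theorem padW_succ (w x : Nat) (hw : 1 ≤ w) :
    padW (w + 1) x = padW w (x / 2) ++ [Nat.digitChar (x % 2)] := by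
  by_cases h : x < 2
  · have hx2 : x / 2 = 0 := by omega
    have hx0 : x % 2 = x := by omega
    rw [padW, padW, hx2, hx0, binN_lt2 x h, binN_lt2 0 (by omega)]
    simp only [List.length_singleton]
    rw [show w + 1 - 1 = (w - 1) + 1 by omega, List.replicate_succ']
    simp
    rfl
  · rw [padW, padW, binN_ge2 x (by omega)]
    simp only [List.length_append, List.length_singleton]
    have := binN_len_pos (x / 2)
    rw [show w + 1 - ((binN (x/2)).length + 1) = w - (binN (x/2)).length by omega]
    simp

theorem padW_eq_map (w : Nat) : ∀ x : Nat, 1 ≤ w → x < 2 ^ w →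
    padW w x = (List.range w).map (fun j => Nat.digitChar ((x >>> (w - 1 - j)) % 2)) := by
  induction w with
  | zero => omega
  | succ w ih =>
    intro x hw hx
    by_cases hw0 : w = 0
    · subst hw0
      have hx2 : x < 2 := by omega
      rw [padW, binN_lt2 x hx2]
      simp [Nat.mod_eq_of_lt hx2]
    · rw [padW_succ w x (by omega), ih (x / 2) (by omega) (by
        have : 2 ^ (w + 1) = 2 ^ w * 2 := by ring
        omega)]
      rw [List.range_succ, List.map_append]
      congr 1
      · apply List.map_congr_left
        intro j hj
        rw [List.mem_range] at hj
        have h1 : w + 1 - 1 - j = (w - 1 - j) + 1 := by omega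
        rw [h1]
        congr 2
        rw [Nat.shiftRight_succ_inside]
      · simp

theorem mod_pow_shift (x c s : Nat) (h : s < c) :
    ((x % 2 ^ c) >>> s) % 2 = (x >>> s) % 2 := by
  have h1 := Nat.testBit_mod_two_pow x c s
  rw [← Nat.decide_shiftRight_mod_two_eq_one, ← Nat.decide_shiftRight_mod_two_eq_one] at h1
  simp only [h, decide_true, Bool.true_and, decide_eq_decide] at h1
  omega

theorem pyRange_nil (q : Int) (h : q ≤ 0) : PySem.List.pyRange 0 q 1 = [] := by
  simp [PySem.List.pyRange]
  omega

theorem floordiv_neg_of_pos (L cs : Int) (hL : 1 ≤ L) (hcs : cs < 0) :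
    PySem.Int.floordiv L cs ≤ -1 := by
  have h1 := PySem.Int.floordiv_mul_add_mod L cs
  have h2 := PySem.Int.mod_neg_bounds L (b := cs) hcs
  set q := PySem.Int.floordiv L cs with hq
  have h3 : 1 ≤ q * cs := by omega
  by_contra hcon
  have h4 : 0 ≤ q := by omega
  nlinarith

theorem bits_eq (n : Int) (hn : 0 ≤ n) :
    PySem.List.slice (PySem.Int.toBinChars0b n) (some 2) none = binN n.toNat := by
  rw [PySem.List.slice_from _ (by omega : (0:Int) ≤ 2)]
  rw [PySem.Int.toBinChars0b]
  simp [show ¬ n < 0 by omega, toDigits_eq]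

theorem main_neg (n cs : Int) (hn : 0 ≤ n) (hcs : cs < 0) :
    pos_int_to_dynamic_bits n cs = pos_int_to_dynamic_bits_alt n cs := by
  rw [pos_int_to_dynamic_bits, pos_int_to_dynamic_bits_alt]
  simp only [bits_eq n hn]
  set L := (binN n.toNat).length with hL
  have hL1 : 1 ≤ L := binN_len_pos n.toNat
  have hmod := PySem.Int.mod_neg_bounds (L : Int) (b := cs) hcs
  rw [show (cs - PySem.Int.mod (L : Int) cs).toNat = 0 by omega]
  simp only [List.replicate_zero, List.nil_append]
  rw [← hL]
  rw [pyRange_nil _ (by have := floordiv_neg_of_pos (L : Int) cs (by omega) hcs; omega)]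
  have hbc : (if PySem.Int.bitLength n = 0 then (1:Int) else (PySem.Int.bitLength n : Int)) = (L : Int) := by
    rw [hL, binN_len, Int.toNat_of_nonneg hn]
    rcases Nat.eq_zero_or_pos (PySem.Int.bitLength n) with h | h
    · simp [h]
    · simp [Nat.ne_of_gt h]
      omega
  rw [hbc]
  rw [pyRange_nil _ (by have := floordiv_neg_of_pos (L : Int) cs (by exact_mod_cast hL1) hcs; omega)]
  simp

theorem take_drop_map_range {α : Type} (f : Nat → α) (W a c : Nat) (h : a + c ≤ W) :
    (((List.range W).map f).drop a).take c = (List.range c).map (fun j => f (a + j)) := by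
  apply List.ext_getElem
  · simp; omega
  · intro i h1 h2
    simp

theorem main_pos (m c : Nat) (hc : 1 ≤ c) :
    pos_int_to_dynamic_bits (m : Int) (c : Int) = pos_int_to_dynamic_bits_alt (m : Int) (c : Int) := by
  rw [pos_int_to_dynamic_bits, pos_int_to_dynamic_bits_alt]
  simp only [bits_eq (m : Int) (by omega), Int.toNat_natCast]
  set L := (binN m).length with hL
  have hL1 : 1 ≤ L := binN_len_pos m
  set nc := L / c + 1 with hnc
  set W := c * nc with hW
  have hdm := Nat.div_add_mod L c
  have hmodlt : L % c < c := Nat.mod_lt _ (by omega)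
  have hWe : W = c * (L / c) + c := by rw [hW, hnc, Nat.mul_add, Nat.mul_one]
  have hLW : L ≤ W := by omega
  -- A side: padded = padW W m
  have hpad : List.replicate ((c : Int) - PySem.Int.mod (L : Int) (c : Int)).toNat '0' ++ binN m
      = padW W m := by
    rw [PySem.Int.mod_natCast, Int.toNat_sub, padW, ← hL,
      show c - L % c = W - L by omega]
  rw [hpad]
  have hplen : ((padW W m).length : Int) = (W : Int) := by
    rw [padW, List.length_append, List.length_replicate, ← hL]
    omega
  rw [hplen, PySem.Int.floordiv_natCast,
    show W / c = nc by rw [hW, Nat.mul_div_cancel_left _ (by omega : 0 < c)]]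
  -- B side: bit_count = L
  have hbc : (if PySem.Int.bitLength (m : Int) = 0 then (1:Int) else (PySem.Int.bitLength (m : Int) : Int)) = (L : Int) := by
    rw [hL, binN_len]
    rcases Nat.eq_zero_or_pos (PySem.Int.bitLength (m : Int)) with h | h
    · simp [h]
    · simp [Nat.ne_of_gt h]
      omega
  rw [hbc, PySem.Int.floordiv_natCast,
    show ((L / c : Nat) : Int) + 1 = ((nc : Nat) : Int) by rw [hnc]; push_cast; ring]
  rw [PySem.List.pyRange_zero_natCast, List.map_map, List.map_map]
  -- pointwise over range nc
  apply congrArg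
  congr 1
  apply congrArg
  apply List.map_congr_left
  intro k hk
  rw [List.mem_range] at hk
  simp only [Function.comp_apply]
  -- A chunk
  have hm2W : m < 2 ^ W := by
    have h1 := PySem.Int.lt_two_pow_bitLength (m : Int)
    have h2 : PySem.Int.bitLength (m : Int) ≤ L := by rw [hL, binN_len]; omega
    have h3 : (2:Nat) ^ PySem.Int.bitLength (m : Int) ≤ 2 ^ W :=
      Nat.pow_le_pow_right (by omega) (by omega)
    simp only [Int.natAbs_natCast] at h1
    omega
  have hWpos : 1 ≤ W := by omega
  rw [show ((k : Int) * (c : Int)) = ((k * c : Nat) : Int) by push_cast; ring,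
    show (((k : Int)) + 1) * (c : Int) = (((k + 1) * c : Nat) : Int) by push_cast; ring,
    PySem.List.slice_natCast]
  rw [padW_eq_map W m hWpos hm2W]
  rw [show (k+1)*c - k*c = c by rw [Nat.succ_mul]; omega]
  rw [take_drop_map_range _ W (k*c) c (by
    have : (k+1) ≤ nc := by omega
    calc k*c + c = (k+1)*c := by ring
    _ ≤ nc * c := Nat.mul_le_mul_right c this
    _ = W := by rw [hW]; ring)]
  -- B chunk
  have hsh : (((nc : Nat) : Int) - 1 - (k : Int)) * (c : Int) = (((nc - 1 - k) * c : Nat) : Int) := by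
    have : ((nc : Nat) : Int) - 1 - (k : Int) = ((nc - 1 - k : Nat) : Int) := by omega
    rw [this]; push_cast; ring
  rw [hsh, Int.toNat_natCast]
  set a := (nc - 1 - k) * c with ha
  rw [show ((1 <<< c : Nat) : Int) - 1 = ((2 ^ c - 1 : Nat) : Int) by
    rw [Nat.shiftLeft_eq, one_mul]; push_cast [Nat.one_le_two_pow]; ring]
  rw [show ((m:Int) >>> a) = ((m >>> a : Nat) : Int) from rfl]
  rw [PySem.Int.band_natCast, Nat.and_two_pow_sub_one_eq_mod]
  set v := (m >>> a) % 2 ^ c with hv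
  have hvlt : v < 2 ^ c := Nat.mod_lt _ (by positivity)
  have htb : PySem.Int.toBinChars ((v : Nat) : Int) = binN v := by
    rw [PySem.Int.toBinChars]
    simp [toDigits_eq]
  rw [htb, Int.toNat_sub, ← padW]
  rw [padW_eq_map c v hc hvlt]
  apply List.map_congr_left
  intro j hj
  rw [List.mem_range] at hj
  rw [hv, mod_pow_shift _ _ _ (by omega : c - 1 - j < c), ← Nat.shiftRight_add]
  have key : a + c + k * c = W := by
    rw [ha, hW]
    have h2 : nc - 1 - k + 1 + k = nc := by omega
    calc (nc - 1 - k) * c + c + k * c = (nc - 1 - k + 1 + k) * c := by ring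
      _ = c * nc := by rw [h2]; ring
  have hexp : a + (c - 1 - j) = W - 1 - (k * c + j) := by omega
  rw [hexp]

-- ===== VERDICT (by name: the statement is the Claim_ definition above) =====
theorem pos_int_to_dynamic_bits_spec : Claim_equal_pos_int_to_dynamic_bits := by
  intro n cs _ hpre
  obtain ⟨hn, hcs⟩ := hpre
  unfold Spec_pos_int_to_dynamic_bits
  rcases (by omega : cs < 0 ∨ 1 ≤ cs) with h | h
  · exact main_neg n cs hn h
  · lift n to Nat using hn
    lift cs to Nat using (by omega : (0:Int) ≤ cs)
    exact main_pos n cs (by exact_mod_cast h)
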